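-- pv_equiv track=rewrite | github.com/Embeded-ojisan/PAST | C/Error_Correction.py | f
-- ===== SOURCE A (Python) =====
-- def f(s, t):
--     if len(s) != len(t)+1:
--         return False
--     si = 0
--     for ti in range(len(t)):
--         while si < len(s) and s[si] != t[ti]:
--             si += 1
--         if si == len(s):
--             return False
--         si += 1
--     return True
-- ===== SOURCE B (Python) =====
-- def f(s, t):
--     if len(s) != len(t) + 1:
--         return False
--     i = 0
--     while i < len(t) and s[i] == t[i]:
--         i += 1
--     return s[i+1:] == t[i:]
-- ===== Notes on version B (the rewrite author's own statement) =====
-- stated objective: simpler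
-- what changed: Replaces the greedy two-pointer subsequence scan (for over t with an inner while over s) by a single prefix scan to the first divergence followed by one slice comparison s[i+1:] == t[i:].
import Mathlib
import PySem

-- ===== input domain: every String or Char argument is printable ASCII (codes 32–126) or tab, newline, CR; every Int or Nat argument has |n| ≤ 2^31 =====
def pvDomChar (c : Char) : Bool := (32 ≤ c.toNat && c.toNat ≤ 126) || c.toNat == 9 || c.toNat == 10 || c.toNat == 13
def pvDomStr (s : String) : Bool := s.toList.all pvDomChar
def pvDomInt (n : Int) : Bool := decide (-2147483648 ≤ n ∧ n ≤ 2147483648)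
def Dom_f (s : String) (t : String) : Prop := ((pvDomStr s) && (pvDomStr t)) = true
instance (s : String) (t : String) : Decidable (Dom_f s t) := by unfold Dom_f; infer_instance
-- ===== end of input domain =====

-- B replaces A's greedy two-pointer subsequence scan by a prefix scan to the first
-- divergence followed by one suffix comparison (objective: simpler).

-- ===== PORT A =====
-- the inner `while si < len(s) and s[si] != t[ti]: si += 1` loop
def fWhile (ls : List Char) (c : Char) (si : Nat) : Nat :=
  if h : si < ls.length then
    if ls[si] = c then si else fWhile ls c (si + 1)
  else si
termination_by ls.length - si

-- the `for ti in range(len(t))` loop, traversing t's characters in order with pointer si into s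
def fGo (ls : List Char) : List Char → Nat → Bool
  | [], _ => true
  | c :: rest, si =>
    let si' := fWhile ls c si
    if si' = ls.length then false else fGo ls rest (si' + 1)

def f (s : String) (t : String) : Bool :=
  if PySem.Str.len s ≠ PySem.Str.len t + 1 then false
  else fGo s.toList t.toList 0

-- ===== PORT B =====
-- `i = 0; while i < len(t) and s[i] == t[i]: i += 1` — length of the common prefix,
-- stopping when t is exhausted (s cannot run out first under the length guard)
def pfxLen : List Char → List Char → Nat
  | x :: l', c :: t' => if x = c then pfxLen l' t' + 1 else 0
  | _, _ => 0

def f_alt (s : String) (t : String) : Bool :=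
  if PySem.Str.len s ≠ PySem.Str.len t + 1 then false
  else
    let i := pfxLen s.toList t.toList
    -- s[i+1:] == t[i:] with i ≥ 0: a slice from a nonnegative start to the end is List.drop (exact)
    s.toList.drop (i + 1) == t.toList.drop i

-- ===== PRECONDITION & SPEC =====
def Spec_f (s : String) (t : String) (out : Bool) : Prop := out = f_alt s t
instance (s : String) (t : String) (out : Bool) : Decidable (Spec_f s t out) := by unfold Spec_f; infer_instance

-- ===== CLAIM (what is proved, stated in full; the proofs are below) =====
def Claim_equal_f : Prop := ∀ (s : String) (t : String), Dom_f s t → Spec_f s t (f s t)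

-- ===== LEMMAS AND PROOFS =====

-- greedy subsequence test, the abstract form of A's loop after erasing the pointer
def G : List Char → List Char → Bool
  | _, [] => true
  | [], _ :: _ => false
  | x :: l', c :: t' => if c = x then G l' t' else G l' (c :: t')

theorem G_of_lt {l t : List Char} (h : l.length < t.length) : G l t = false := by
  induction l generalizing t with
  | nil =>
    cases t with
    | nil => simp at h
    | cons c t' => simp [G]
  | cons x l' ih =>
    cases t with
    | nil => simp at h
    | cons c t' =>
      simp only [G]
      split
      · exact ih (by simpa using Nat.lt_of_succ_lt_succ h)
      · exact ih (by simpa using Nat.lt_of_succ_lt h)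

theorem G_of_eq {l t : List Char} (h : l.length = t.length) : G l t = (l == t) := by
  induction t generalizing l with
  | nil =>
    cases l with
    | nil => simp [G]
    | cons x l' => simp at h
  | cons c t' ih =>
    cases l with
    | nil => simp at h
    | cons x l' =>
      simp only [G]
      by_cases hxc : c = x
      · subst hxc
        rw [ih (by simpa using h)]
        simp
      · rw [if_neg hxc, G_of_lt]
        · simp [Ne.symm hxc]
        · simp only [List.length_cons] at h ⊢; omega

theorem G_eq_suffix {l t : List Char} (h : l.length = t.length + 1) :
    G l t = (l.drop (pfxLen l t + 1) == t.drop (pfxLen l t)) := by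
  induction t generalizing l with
  | nil =>
    cases l with
    | nil => simp at h
    | cons x l' =>
      cases l' with
      | nil => simp [G, pfxLen]
      | cons y l'' => simp at h
  | cons c t' ih =>
    cases l with
    | nil => simp at h
    | cons x l' =>
      simp only [G, pfxLen]
      by_cases hxc : x = c
      · subst hxc
        rw [if_pos rfl, if_pos rfl, ih (by simpa using h)]
        simp
      · rw [if_neg (Ne.symm hxc), if_neg hxc]
        rw [G_of_eq (by simp at h ⊢; omega)]
        simp

theorem fWhile_unfold (ls : List Char) (c : Char) (si : Nat) :
    fWhile ls c si =
      if h : si < ls.length then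
        if ls[si] = c then si else fWhile ls c (si + 1)
      else si := by
  rw [fWhile]

theorem fWhile_spec (ls : List Char) (c : Char) (rest : List Char) :
    ∀ si, si ≤ ls.length →
      fWhile ls c si ≤ ls.length ∧
      G (ls.drop si) (c :: rest) =
        (if fWhile ls c si = ls.length then false
         else G (ls.drop (fWhile ls c si + 1)) rest) := by
  intro si
  induction hn : ls.length - si using Nat.strong_induction_on generalizing si with
  | _ n ih =>
    intro hsi
    rw [fWhile_unfold]
    by_cases h : si < ls.length
    · rw [dif_pos h]
      rw [List.drop_eq_getElem_cons h]
      by_cases hc : ls[si] = c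
      · rw [if_pos hc]
        refine ⟨hsi, ?_⟩
        have : si ≠ ls.length := Nat.ne_of_lt h
        simp [G, hc, this]
      · rw [if_neg hc]
        have hrec := ih (ls.length - (si + 1)) (by omega) (si + 1) rfl h
        refine ⟨hrec.1, ?_⟩
        simp only [G]
        rw [if_neg (fun he : c = ls[si] => hc he.symm)]
        exact hrec.2
    · rw [dif_neg h]
      have : si = ls.length := le_antisymm hsi (le_of_not_gt h)
      subst this
      simp [G]

theorem fGo_eq_G (ls : List Char) :
    ∀ ts si, si ≤ ls.length → fGo ls ts si = G (ls.drop si) ts := by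
  intro ts
  induction ts with
  | nil => intro si _; simp [fGo, G]
  | cons c rest ih =>
    intro si hsi
    obtain ⟨hb, hG⟩ := fWhile_spec ls c rest si hsi
    simp only [fGo]
    rw [hG]
    by_cases he : fWhile ls c si = ls.length
    · simp [he]
    · rw [if_neg he, if_neg he, ih (fWhile ls c si + 1) (by omega)]

-- ===== VERDICT (by name: the statement is the Claim_ definition above) =====
theorem f_spec : Claim_equal_f := by
  intro s t _
  unfold Spec_f f f_alt
  by_cases hg : PySem.Str.len s ≠ PySem.Str.len t + 1
  · rw [if_pos hg, if_pos hg]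
  · rw [if_neg hg, if_neg hg]
    have hlen : s.toList.length = t.toList.length + 1 := by
      simp only [not_not, PySem.Str.len_eq] at hg
      exact_mod_cast hg
    rw [fGo_eq_G s.toList t.toList 0 (Nat.zero_le _)]
    simpa using G_eq_suffix hlen
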